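-- pv_equiv track=rewrite | github.com/minkishome/TIL-master | 알고리즘-파이참/190918/container.py | find
-- ===== SOURCE A (Python) =====
-- def find(ls_con, ls_bus):
--     summ = 0
--     cnt = 0
--     a = min(len(ls_bus), len(ls_con))
--     for i in range(len(ls_con) -1 , -1, -1):
--         cnt += 1
--         for j in range(len(ls_bus) -1, -1, -1):
--             if ls_con[i] <= ls_bus[j]:
--                 summ += ls_con[i]
--                 ls_bus[j] = 0
--                 break
--
--         if cnt == a:
--             return summ
-- ===== SOURCE B (Python) =====
-- # B: segment tree (max) over bus positions; for each of the last min(n,m) containers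
-- # (right to left) descend to the rightmost bus with capacity >= c, add c, zero that bus.
-- # Unlike A it does not mutate ls_bus; returns 0 (not None) when either list is empty.
--
-- def _build(vals):
--     # node = (max, left_size, left, right); leaf has left=right=None
--     if len(vals) == 1:
--         return (vals[0], 1, None, None)
--     mid = len(vals) // 2
--     l = _build(vals[:mid])
--     r = _build(vals[mid:])
--     return (l[0] if l[0] >= r[0] else r[0], mid, l, r)
--
-- def _rightmost(t, c):
--     # assumes c <= t[0]; returns rightmost leaf index with value >= c
--     idx = 0
--     while t[2] is not None:
--         if c <= t[3][0]:
--             idx += t[1]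
--             t = t[3]
--         else:
--             t = t[2]
--     return idx
--
-- def _zero(t, j):
--     if t[2] is None:
--         return (0, 1, None, None)
--     mx, lsz, l, r = t
--     if j < lsz:
--         l = _zero(l, j)
--     else:
--         r = _zero(r, j - lsz)
--     return (l[0] if l[0] >= r[0] else r[0], lsz, l, r)
--
-- def find(ls_con, ls_bus):
--     if not ls_con or not ls_bus:
--         return 0
--     a = min(len(ls_bus), len(ls_con))
--     t = _build(ls_bus)
--     total = 0
--     for c in ls_con[len(ls_con) - a:][::-1]:
--         if c <= t[0]:
--             total += c
--             t = _zero(t, _rightmost(t, c))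
--     return total
-- ===== Notes on version B (the rewrite author's own statement) =====
-- stated objective: faster
-- what changed: Replaces A's per-container right-to-left rescan of the whole bus list by a max segment tree over bus positions: descend right-first to the rightmost bus with capacity >= c, add c, zero that leaf.
-- outside the precondition, e.g. on find([], [1]): A returns None, B returns 0; on find([1], []): A returns None, B returns 0
import Mathlib
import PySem

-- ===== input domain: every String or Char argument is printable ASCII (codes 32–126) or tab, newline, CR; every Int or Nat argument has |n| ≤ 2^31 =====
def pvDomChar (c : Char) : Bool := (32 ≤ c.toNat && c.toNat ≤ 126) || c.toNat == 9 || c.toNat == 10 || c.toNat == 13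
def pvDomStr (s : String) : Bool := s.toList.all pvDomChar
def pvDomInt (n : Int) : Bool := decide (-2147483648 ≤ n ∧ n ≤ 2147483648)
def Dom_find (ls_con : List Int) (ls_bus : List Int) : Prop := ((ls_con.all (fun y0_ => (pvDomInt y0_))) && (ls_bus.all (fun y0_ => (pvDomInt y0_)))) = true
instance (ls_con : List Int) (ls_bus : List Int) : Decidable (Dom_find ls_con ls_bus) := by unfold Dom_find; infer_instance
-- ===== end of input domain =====

-- B replaces A's inner right-to-left rescan of the buses by a max segment tree over the bus
-- positions (descend right-first to the rightmost fitting bus, then zero that leaf).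
-- A mutates ls_bus in place (zeroes matched buses); B does not — the equivalence proved here
-- is about the RETURN value only.

-- ===== PORT A =====
-- inner loop 'for j in range(len(ls_bus)-1,-1,-1): if ls_con[i] <= ls_bus[j]: ... break'
def scanJ (c : Int) (bus : List Int) : List Nat → Option Nat
  | [] => none
  | j :: rest => if c ≤ bus.getD j 0 then some j else scanJ c bus rest

-- outer loop with the counter and the early 'return summ' at cnt == a; the [] base returns 0
-- where Python falls off the loop and returns None (only reachable outside Pre_find)
def findAux (con : List Int) (a : Nat) : List Nat → List Int → Int → Nat → Int
  | [], _, _, _ => 0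
  | i :: rest, bus, summ, cnt =>
    let c := con.getD i 0
    match scanJ c bus ((List.range bus.length).reverse) with
    | some j =>
      if cnt + 1 = a then summ + c else findAux con a rest (bus.set j 0) (summ + c) (cnt + 1)
    | none =>
      if cnt + 1 = a then summ else findAux con a rest bus summ (cnt + 1)

def find (ls_con : List Int) (ls_bus : List Int) : Int :=
  findAux ls_con (min ls_bus.length ls_con.length) ((List.range ls_con.length).reverse) ls_bus 0 0

-- ===== PORT B =====
-- segment-tree node: (max, left_size, left, right); leaf carries its value
inductive STree where
  | leaf (v : Int) : STree
  | node (mx : Int) (lsz : Nat) (l : STree) (r : STree) : STree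
deriving DecidableEq, Repr

def STree.mxOf : STree → Int
  | .leaf v => v
  | .node mx _ _ _ => mx

def buildT : List Int → STree
  | [] => .leaf 0      -- never called on [] (guarded in find_alt), placeholder
  | [v] => .leaf v
  | x :: y :: rest =>
    let l := buildT ((x :: y :: rest).take ((x :: y :: rest).length / 2))
    let r := buildT ((x :: y :: rest).drop ((x :: y :: rest).length / 2))
    .node (max l.mxOf r.mxOf) ((x :: y :: rest).length / 2) l r
termination_by xs => xs.length
decreasing_by
  · simp [List.length_take]; omega
  · simp [List.length_drop]; omega

-- descend, right child first (assumes c ≤ t.mxOf)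
def rightmostT : STree → Int → Nat
  | .leaf _, _ => 0
  | .node _ lsz l r, c => if c ≤ r.mxOf then lsz + rightmostT r c else rightmostT l c

def zeroT : STree → Nat → STree
  | .leaf _, _ => .leaf 0
  | .node _ lsz l r, j =>
    if j < lsz then
      let l' := zeroT l j
      .node (max l'.mxOf r.mxOf) lsz l' r
    else
      let r' := zeroT r (j - lsz)
      .node (max l.mxOf r'.mxOf) lsz l r'

def find_alt (ls_con : List Int) (ls_bus : List Int) : Int :=
  if ls_con = [] ∨ ls_bus = [] then 0
  else
    let a := min ls_bus.length ls_con.length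
    let step := fun (st : STree × Int) (c : Int) =>
      if c ≤ st.1.mxOf then (zeroT st.1 (rightmostT st.1 c), st.2 + c) else st
    (((ls_con.drop (ls_con.length - a)).reverse).foldl step (buildT ls_bus, 0)).2

-- ===== PRECONDITION & SPEC =====
-- Pre_ excludes inputs with an empty container or bus list: there Python A falls off its loop
-- and returns None (no int value); B returns 0.
def Pre_find (ls_con : List Int) (ls_bus : List Int) : Prop := ls_con ≠ [] ∧ ls_bus ≠ []
instance (ls_con : List Int) (ls_bus : List Int) : Decidable (Pre_find ls_con ls_bus) := by unfold Pre_find; infer_instance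

def pvWitness_find : List Int × List Int := ([3, 2], [4, 1])

def Spec_find (ls_con : List Int) (ls_bus : List Int) (out : Int) : Prop := out = find_alt ls_con ls_bus
instance (ls_con : List Int) (ls_bus : List Int) (out : Int) : Decidable (Spec_find ls_con ls_bus out) := by unfold Spec_find; infer_instance

-- ===== CLAIM (what is proved, stated in full; the proofs are below) =====
def Claim_equal_find : Prop := ∀ (ls_con : List Int) (ls_bus : List Int), Dom_find ls_con ls_bus → Pre_find ls_con ls_bus → Spec_find ls_con ls_bus (find ls_con ls_bus)

-- ===== LEMMAS AND PROOFS =====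

@[simp] theorem mxOf_leaf (v : Int) : (STree.leaf v).mxOf = v := rfl
@[simp] theorem mxOf_node (mx : Int) (lsz : Nat) (l r : STree) : (STree.node mx lsz l r).mxOf = mx := rfl

-- model of a tree: its leaf values, left to right
def toL : STree → List Int
  | .leaf v => [v]
  | .node _ _ l r => toL l ++ toL r

-- well-formedness: cached sizes and maxima are correct
def WF : STree → Prop
  | .leaf _ => True
  | .node mx lsz l r => WF l ∧ WF r ∧ lsz = (toL l).length ∧ mx = max l.mxOf r.mxOf

-- rightmost index with c ≤ value (the value A's inner scan computes), as a structural recursion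
def rIdx (c : Int) : List Int → Option Nat
  | [] => none
  | x :: xs =>
    match rIdx c xs with
    | some j => some (j + 1)
    | none => if c ≤ x then some 0 else none

theorem mx_iff (t : STree) (c : Int) (h : WF t) : c ≤ t.mxOf ↔ ∃ x ∈ toL t, c ≤ x := by
  induction t with
  | leaf v => simp [toL]
  | node mx lsz l r ihl ihr =>
    obtain ⟨hl, hr, -, hmx⟩ := h
    simp only [toL, mxOf_node, hmx, le_max_iff, List.mem_append]
    rw [ihl hl, ihr hr]
    constructor
    · rintro (⟨x, hx, hcx⟩ | ⟨x, hx, hcx⟩) <;> exact ⟨x, by tauto, hcx⟩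
    · rintro ⟨x, hx | hx, hcx⟩
      · exact Or.inl ⟨x, hx, hcx⟩
      · exact Or.inr ⟨x, hx, hcx⟩

theorem rIdx_none_iff (c : Int) (xs : List Int) : rIdx c xs = none ↔ ∀ x ∈ xs, ¬ c ≤ x := by
  induction xs with
  | nil => simp [rIdx]
  | cons x xs ih =>
    simp only [rIdx, List.mem_cons, forall_eq_or_imp]
    cases h : rIdx c xs with
    | some j =>
      simp only [reduceCtorEq, false_iff, not_and]
      intro _ hall
      exact absurd (ih.mpr hall) (by simp [h])
    | none =>
      have hall := ih.mp h
      split_ifs with hc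
      · simp [hc]
      · exact iff_of_true rfl ⟨hc, hall⟩

theorem rIdx_append (c : Int) (L R : List Int) :
    rIdx c (L ++ R) = match rIdx c R with
      | some j => some (L.length + j)
      | none => rIdx c L := by
  induction L with
  | nil => cases h : rIdx c R <;> simp [rIdx, h]
  | cons x L ih =>
    simp only [List.cons_append, rIdx, ih]
    cases h : rIdx c R <;> simp [rIdx] <;> cases h2 : rIdx c L <;> simp [Nat.add_assoc, Nat.add_comm]

theorem rIdx_lt (c : Int) (xs : List Int) (j : Nat) (h : rIdx c xs = some j) : j < xs.length := by
  induction xs generalizing j with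
  | nil => simp [rIdx] at h
  | cons x xs ih =>
    simp only [rIdx] at h
    cases h2 : rIdx c xs with
    | some k => rw [h2] at h; simp at h; subst h; have := ih k h2; simpa using by omega
    | none => rw [h2] at h; split_ifs at h <;> simp_all <;> omega

-- descend finds exactly the rightmost fitting leaf
theorem rightmostT_correct (t : STree) (c : Int) (h : WF t) (hc : c ≤ t.mxOf) :
    rIdx c (toL t) = some (rightmostT t c) := by
  induction t with
  | leaf v => simp [toL, rIdx, rightmostT]; simpa [STree.mxOf] using hc
  | node mx lsz l r ihl ihr =>
    obtain ⟨hl, hr, hsz, hmx⟩ := h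
    simp only [toL, rIdx_append, rightmostT]
    by_cases hrc : c ≤ r.mxOf
    · rw [ihr hr hrc]; simp [hrc, hsz]
    · have hnone : rIdx c (toL r) = none := by
        rw [rIdx_none_iff]
        intro x hx hcx
        exact hrc ((mx_iff r c hr).mpr ⟨x, hx, hcx⟩)
      have hlc : c ≤ l.mxOf := by
        simp only [STree.mxOf, hmx, le_max_iff] at hc
        tauto
      rw [hnone, ihl hl hlc]; simp [hrc]

theorem set_append (L R : List Int) (j : Nat) (v : Int) :
    (L ++ R).set j v = if j < L.length then L.set j v ++ R else L ++ R.set (j - L.length) v := by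
  split_ifs with h
  · exact List.set_append_left _ _ h
  · exact List.set_append_right _ _ (by omega)

theorem zeroT_correct (t : STree) (j : Nat) (h : WF t) (hj : j < (toL t).length) :
    toL (zeroT t j) = (toL t).set j 0 ∧ WF (zeroT t j) := by
  induction t generalizing j with
  | leaf v =>
    simp only [toL, List.length_cons, List.length_nil] at hj
    simp [toL, zeroT, WF, show j = 0 from by omega]
  | node mx lsz l r ihl ihr =>
    obtain ⟨hl, hr, hsz, hmx⟩ := h
    have hjlen : j < (toL l).length + (toL r).length := by
      simpa [toL] using hj
    by_cases hjl : j < lsz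
    · obtain ⟨h1, h2⟩ := ihl j hl (by omega)
      have hz : zeroT (STree.node mx lsz l r) j
          = .node (max (zeroT l j).mxOf r.mxOf) lsz (zeroT l j) r := by
        simp [zeroT, hjl]
      rw [hz]
      constructor
      · simp only [toL, h1]
        rw [set_append, if_pos (show j < (toL l).length from by omega)]
      · exact ⟨h2, hr, by simp [h1, hsz], rfl⟩
    · obtain ⟨h1, h2⟩ := ihr (j - lsz) hr (by omega)
      have hz : zeroT (STree.node mx lsz l r) j
          = .node (max l.mxOf (zeroT r (j - lsz)).mxOf) lsz l (zeroT r (j - lsz)) := by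
        simp [zeroT, hjl]
      rw [hz]
      constructor
      · simp only [toL, h1]
        rw [set_append, if_neg (show ¬ j < (toL l).length from by omega), ← hsz]
      · exact ⟨hl, h2, hsz, rfl⟩

theorem buildT_correct (xs : List Int) (hne : xs ≠ []) :
    toL (buildT xs) = xs ∧ WF (buildT xs) := by
  induction xs using buildT.induct with
  | case1 => simp at hne
  | case2 v => simp [buildT, toL, WF]
  | case3 x y rest ih1 ih2 =>
    obtain ⟨h1, h2⟩ := ih1 (by apply List.ne_nil_of_length_pos; simp)
    obtain ⟨h3, h4⟩ := ih2 (by apply List.ne_nil_of_length_pos; simp; omega)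
    rw [buildT]
    refine ⟨?_, h2, h4, ?_, rfl⟩
    · show toL _ ++ toL _ = _
      rw [h1, h3, List.take_append_drop]
    · rw [h1]
      simp [List.length_take]
      omega

-- A's inner scan over the reversed index range computes rIdx
theorem scanJ_shrink (c : Int) (bus ys : List Int) (js : List Nat)
    (hpre : ∀ j ∈ js, j < ys.length) (hget : ∀ j ∈ js, bus.getD j 0 = ys.getD j 0) :
    scanJ c bus js = scanJ c ys js := by
  induction js with
  | nil => rfl
  | cons j js ih =>
    simp only [scanJ, hget j (by simp)]
    split_ifs with h
    · rfl
    · exact ih (fun k hk => hpre k (by simp [hk])) (fun k hk => hget k (by simp [hk]))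

theorem scanJ_eq_rIdx (c : Int) (bus : List Int) :
    scanJ c bus ((List.range bus.length).reverse) = rIdx c bus := by
  induction bus using List.reverseRecOn with
  | nil => simp [scanJ, rIdx]
  | append_singleton ys y ih =>
    have hrange : (List.range (ys ++ [y]).length).reverse = ys.length :: (List.range ys.length).reverse := by
      simp [List.range_succ]
    rw [hrange]
    simp only [scanJ]
    have hgety : (ys ++ [y]).getD ys.length 0 = y := by
      simp [List.getD]
    rw [hgety]
    have happ : rIdx c (ys ++ [y]) = if c ≤ y then some ys.length else rIdx c ys := by
      rw [rIdx_append]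
      by_cases h : c ≤ y <;> simp [rIdx, h]
    rw [happ]
    split_ifs with h
    · rfl
    · rw [← ih]
      apply scanJ_shrink
      · intro j hj; simp at hj; omega
      · intro j hj
        simp at hj
        simp [List.getD, List.getElem?_append_left hj]

-- clean recursion over the container values, A-style (full consumption)
def procA : List Int → List Int → Int → Int
  | [], _, summ => summ
  | c :: cs, bus, summ =>
    match rIdx c bus with
    | some j => procA cs (bus.set j 0) (summ + c)
    | none => procA cs bus summ

-- A's loop with counter and early return equals procA on the first (a - cnt) indices
theorem findAux_eq_procA (con : List Int) (a : Nat) (idxs : List Nat) (bus : List Int)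
    (summ : Int) (cnt : Nat) (hlt : cnt < a) (hlen : a - cnt ≤ idxs.length) :
    findAux con a idxs bus summ cnt =
      procA ((idxs.take (a - cnt)).map (fun i => con.getD i 0)) bus summ := by
  induction idxs generalizing bus summ cnt with
  | nil => simp at hlen; omega
  | cons i rest ih =>
    have htake : a - cnt = (a - (cnt + 1)) + 1 := by omega
    rw [findAux, htake]
    simp only [List.take_succ_cons, List.map_cons, procA]
    rw [scanJ_eq_rIdx]
    cases h : rIdx (con.getD i 0) bus with
    | some j =>
      simp only
      by_cases hc : cnt + 1 = a
      · simp [hc, procA]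
      · rw [if_neg hc, ih _ _ _ (by omega) (by simp at hlen ⊢; omega)]
    | none =>
      simp only
      by_cases hc : cnt + 1 = a
      · simp [hc, procA]
      · rw [if_neg hc, ih _ _ _ (by omega) (by simp at hlen ⊢; omega)]

-- B's fold maintains the tree as a picture of A's bus list
theorem procA_eq_fold (cs : List Int) (bus : List Int) (summ : Int) (t : STree)
    (hwf : WF t) (hmodel : toL t = bus) :
    procA cs bus summ =
      (cs.foldl (fun (st : STree × Int) (c : Int) =>
        if c ≤ st.1.mxOf then (zeroT st.1 (rightmostT st.1 c), st.2 + c) else st) (t, summ)).2 := by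
  induction cs generalizing bus summ t with
  | nil => simp [procA]
  | cons c cs ih =>
    simp only [procA, List.foldl_cons]
    by_cases hc : c ≤ t.mxOf
    · have hsome := rightmostT_correct t c hwf hc
      rw [hmodel] at hsome
      rw [hsome]
      have hj : rightmostT t c < (toL t).length := by
        have := rIdx_lt c bus _ hsome; rwa [hmodel]
      obtain ⟨hm, hw⟩ := zeroT_correct t (rightmostT t c) hwf hj
      simp only [hc, if_true]
      exact ih _ _ _ hw (by rw [hm, hmodel])
    · have hnone : rIdx c bus = none := by
        rw [rIdx_none_iff]
        intro x hx hcx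
        exact hc ((mx_iff t c hwf).mpr ⟨x, by rwa [hmodel], hcx⟩)
      rw [hnone]
      simp only [hc, if_false]
      exact ih _ _ _ hwf hmodel

-- the index prefix A visits carries exactly the values B folds over
theorem indices_vals (con : List Int) (a : Nat) (ha : a ≤ con.length) :
    ((List.range con.length).reverse.take a).map (fun i => con.getD i 0) =
      (con.drop (con.length - a)).reverse := by
  apply List.ext_getElem
  · simp; omega
  · intro i h1 h2
    simp only [List.getElem_map, List.getElem_take, List.getElem_reverse, List.getElem_range,
      List.getElem_drop]
    simp only [List.length_reverse, List.length_range, List.length_drop] at h1 h2 ⊢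
    have hidx : con.length - 1 - i < con.length := by omega
    simp [List.getD, List.getElem?_eq_getElem hidx]
    congr 1
    omega

-- ===== VERDICT (by name: the statement is the Claim_ definition above) =====
theorem find_spec : Claim_equal_find := by
  intro con bus _ hpre
  obtain ⟨hcon, hbus⟩ := hpre
  unfold Spec_find find find_alt
  rw [if_neg (by simp [hcon, hbus])]
  have hconl : 0 < con.length := List.length_pos_of_ne_nil hcon
  have hbusl : 0 < bus.length := List.length_pos_of_ne_nil hbus
  set a := min bus.length con.length with ha
  have ha1 : 1 ≤ a := by omega
  have ha2 : a ≤ con.length := by omega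
  rw [findAux_eq_procA con a _ bus 0 0 (by omega) (by simpa using ha2)]
  simp only [Nat.sub_zero]
  rw [indices_vals con a ha2]
  obtain ⟨hm, hw⟩ := buildT_correct bus hbus
  exact procA_eq_fold _ bus 0 _ hw hm
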